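-- pv_equiv track=rewrite | github.com/yaojingang/yao-doctor-skill | scripts/build_public_example_report.py | summarize_findings
-- ===== SOURCE A (Python) =====
-- def summarize_findings(findings: list[dict]) -> dict:
--     evidence_kind: dict[str, int] = {}
--     evidence_confidence: dict[str, int] = {}
--     protected_surfaces: dict[str, int] = {}
--     for item in findings:
--         evidence_kind[item["evidence_kind"]] = evidence_kind.get(item["evidence_kind"], 0) + 1
--         evidence_confidence[item["evidence_confidence"]] = evidence_confidence.get(item["evidence_confidence"], 0) + 1
--         protected = item.get("protected_surface")
--         if protected:
--             protected_surfaces[protected] = protected_surfaces.get(protected, 0) + 1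
--     return {
--         "evidence_kind": evidence_kind,
--         "evidence_confidence": evidence_confidence,
--         "protected_surfaces": protected_surfaces,
--     }
-- ===== SOURCE B (Python) =====
-- def _count(values):
--     counts = {}
--     for v in values:
--         counts[v] = counts.get(v, 0) + 1
--     return counts
--
--
-- def summarize_findings(findings: list[dict]) -> dict:
--     return {
--         "evidence_kind": _count(item["evidence_kind"] for item in findings),
--         "evidence_confidence": _count(item["evidence_confidence"] for item in findings),
--         "protected_surfaces": _count(s for item in findings if (s := item.get("protected_surface"))),
--     }
-- ===== Notes on version B (the rewrite author's own statement) =====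
-- stated objective: idiomatic
-- what changed: Instead of one loop threading three count dicts in parallel, B builds each of the three maps independently with a shared counting helper applied to a projected/filtered generator over the findings.
import Mathlib
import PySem

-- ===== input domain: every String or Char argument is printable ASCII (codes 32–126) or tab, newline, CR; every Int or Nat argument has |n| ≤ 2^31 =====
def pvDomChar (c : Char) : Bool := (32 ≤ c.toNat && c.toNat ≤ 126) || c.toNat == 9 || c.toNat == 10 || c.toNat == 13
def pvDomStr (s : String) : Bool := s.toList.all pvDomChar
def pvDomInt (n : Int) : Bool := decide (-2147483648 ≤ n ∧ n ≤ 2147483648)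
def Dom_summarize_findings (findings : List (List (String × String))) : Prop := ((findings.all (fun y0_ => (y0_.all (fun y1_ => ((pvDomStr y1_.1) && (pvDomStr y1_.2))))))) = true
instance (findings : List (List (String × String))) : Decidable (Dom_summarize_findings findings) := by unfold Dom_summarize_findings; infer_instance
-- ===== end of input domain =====

-- B replaces A's single loop threading three count dicts by three independent counting passes (shared helper over projected/filtered values); idiomatic decomposition, same cost.


-- ===== PORT A =====
-- item[k] (KeyError when missing — excluded by Pre_; '.getD ""' is never reached inside Pre_)
def pyKeyGet (item : List (String × String)) (k : String) : String :=
  ((PySem.Dict.mk item).get? k).getD ""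

-- item.get(k)
def pyOptGet (item : List (String × String)) (k : String) : Option String :=
  (PySem.Dict.mk item).get? k

def summarize_findings (findings : List (List (String × String))) : List (String × List (String × Int)) :=
  let st := findings.foldl
    (fun (st : PySem.Dict String Int × PySem.Dict String Int × PySem.Dict String Int) item =>
      let ek := st.1.insert (pyKeyGet item "evidence_kind") (st.1.getD (pyKeyGet item "evidence_kind") 0 + 1)
      let ec := st.2.1.insert (pyKeyGet item "evidence_confidence") (st.2.1.getD (pyKeyGet item "evidence_confidence") 0 + 1)
      let ps := match pyOptGet item "protected_surface" with
        | some p => if p ≠ "" then st.2.2.insert p (st.2.2.getD p 0 + 1) else st.2.2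
        | none => st.2.2
      (ek, ec, ps))
    (PySem.Dict.empty, PySem.Dict.empty, PySem.Dict.empty)
  [("evidence_kind", st.1.items), ("evidence_confidence", st.2.1.items), ("protected_surfaces", st.2.2.items)]

-- ===== PORT B =====
-- B's _count helper
def pvCount (values : List String) : PySem.Dict String Int :=
  values.foldl (fun d v => d.insert v (d.getD v 0 + 1)) PySem.Dict.empty

-- the truthy-filtered protected_surface of one item (the 'if (s := item.get(...))' clause)
def pvTruthy? (item : List (String × String)) : Option String :=
  match pyOptGet item "protected_surface" with
  | some s => if s ≠ "" then some s else none
  | none => none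

def summarize_findings_alt (findings : List (List (String × String))) : List (String × List (String × Int)) :=
  [("evidence_kind", (pvCount (findings.map (fun item => pyKeyGet item "evidence_kind"))).items),
   ("evidence_confidence", (pvCount (findings.map (fun item => pyKeyGet item "evidence_confidence"))).items),
   ("protected_surfaces", (pvCount (findings.filterMap pvTruthy?)).items)]

-- ===== PRECONDITION & SPEC =====
-- Pre_ excludes exactly the inputs where the Python A raises KeyError: an item lacking "evidence_kind" or "evidence_confidence".
def Pre_summarize_findings (findings : List (List (String × String))) : Prop :=
  (findings.all (fun item => (PySem.Dict.mk item).contains "evidence_kind" && (PySem.Dict.mk item).contains "evidence_confidence")) = true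
instance (findings : List (List (String × String))) : Decidable (Pre_summarize_findings findings) := by unfold Pre_summarize_findings; infer_instance

def pvWitness_summarize_findings : (List (List (String × String))) :=
  [[("evidence_kind", "secret"), ("evidence_confidence", "high"), ("protected_surface", "login")],
   [("evidence_kind", "secret"), ("evidence_confidence", "low")]]

def Spec_summarize_findings (findings : List (List (String × String))) (out : List (String × List (String × Int))) : Prop := out = summarize_findings_alt findings
instance (findings : List (List (String × String))) (out : List (String × List (String × Int))) : Decidable (Spec_summarize_findings findings out) := by unfold Spec_summarize_findings; infer_instance

-- ===== CLAIM (what is proved, stated in full; the proofs are below) =====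
def Claim_equal_summarize_findings : Prop := ∀ (findings : List (List (String × String))), Dom_summarize_findings findings → Pre_summarize_findings findings → Spec_summarize_findings findings (summarize_findings findings)

-- ===== LEMMAS AND PROOFS =====

-- A's triple-state loop splits into three independent counting folds.
theorem pv_tri (l : List (List (String × String)))
    (d1 d2 d3 : PySem.Dict String Int) :
    l.foldl
      (fun (st : PySem.Dict String Int × PySem.Dict String Int × PySem.Dict String Int) item =>
        let ek := st.1.insert (pyKeyGet item "evidence_kind") (st.1.getD (pyKeyGet item "evidence_kind") 0 + 1)
        let ec := st.2.1.insert (pyKeyGet item "evidence_confidence") (st.2.1.getD (pyKeyGet item "evidence_confidence") 0 + 1)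
        let ps := match pyOptGet item "protected_surface" with
          | some p => if p ≠ "" then st.2.2.insert p (st.2.2.getD p 0 + 1) else st.2.2
          | none => st.2.2
        (ek, ec, ps)) (d1, d2, d3)
    = ((l.map (fun item => pyKeyGet item "evidence_kind")).foldl (fun d v => d.insert v (d.getD v 0 + 1)) d1,
       (l.map (fun item => pyKeyGet item "evidence_confidence")).foldl (fun d v => d.insert v (d.getD v 0 + 1)) d2,
       (l.filterMap pvTruthy?).foldl (fun d v => d.insert v (d.getD v 0 + 1)) d3) := by
  induction l generalizing d1 d2 d3 with
  | nil => rfl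
  | cons item rest ih =>
    simp only [List.map_cons, List.foldl_cons, List.filterMap_cons]
    rw [show pvTruthy? item = (match pyOptGet item "protected_surface" with
        | some s => if s ≠ "" then some s else none
        | none => none) from rfl]
    cases h : pyOptGet item "protected_surface" with
    | none => simpa using ih _ _ _
    | some p =>
      by_cases hp : p = ""
      · simpa [hp] using ih _ _ _
      · simpa [hp] using ih _ _ _

-- ===== VERDICT (by name: the statement is the Claim_ definition above) =====
theorem summarize_findings_spec : Claim_equal_summarize_findings := by
  intro findings _ _
  show summarize_findings findings = summarize_findings_alt findings
  unfold summarize_findings summarize_findings_alt pvCount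
  rw [pv_tri]
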